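-- pv_equiv track=rewrite | github.com/20xygen/Finite-state-machines-automatons- | operations/poland.py | to_polish_notation
-- ===== SOURCE A (Python) =====
-- priority = {
--     '^': 4,  # плюс Клини
--     '*': 3,  # звезда Клини
--     '.': 2,  # конкатенация
--     '+': 1   # объединение
-- }
--
-- def is_operator(sym: str):
--     return sym in {'*', '+', '.', '^'}
--
-- def is_symbol(sym: str):
--     return sym.isalnum() or sym == '_'
--
-- def add_concatenation(regex):
--     result = []
--     for i in range(len(regex) - 1):
--         result.append(regex[i])
--         if (is_symbol(regex[i]) or regex[i] == ')' or regex[i] == '*' or regex[i] == '^') and \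
--                 (is_symbol(regex[i + 1]) or regex[i + 1] == '('):
--             result.append('.')
--     result.append(regex[-1])
--     return ''.join(result)
--
-- def to_polish_notation(regex):
--     if len(regex) == 0:
--         raise ValueError('Empty regex')
--     regex = add_concatenation(regex)
--     output = []
--     operators = []
--
--     for char in regex:
--         if is_symbol(char):
--             output.append(char)
--
--         elif char == '(':
--             operators.append(char)
--
--         elif char == ')':
--             while operators and operators[-1] != '(':
--                 output.append(operators.pop())
--             operators.pop()
--
--         elif is_operator(char):
--             while operators and operators[-1] != '(' and priority[operators[-1]] >= priority[char]:
--                 output.append(operators.pop())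
--             operators.append(char)
--
--     while operators:
--         output.append(operators.pop())
--
--     return ''.join(output)
-- ===== SOURCE B (Python) =====
-- priority = {
--     '^': 4,
--     '*': 3,
--     '.': 2,
--     '+': 1
-- }
--
-- def to_polish_notation(regex):
--     if len(regex) == 0:
--         raise ValueError('Empty regex')
--     output = []
--     operators = []
--
--     def push_operator(op):
--         while operators and operators[-1] != '(' and priority[operators[-1]] >= priority[op]:
--             output.append(operators.pop())
--         operators.append(op)
--
--     prev = None
--     for char in regex:
--         symbol = char.isalnum() or char == '_'
--         # implicit concatenation between prev and char, fused into the single pass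
--         if prev is not None and (prev.isalnum() or prev in '_)*^') and (symbol or char == '('):
--             push_operator('.')
--         if symbol:
--             output.append(char)
--         elif char == '(':
--             operators.append(char)
--         elif char == ')':
--             while operators and operators[-1] != '(':
--                 output.append(operators.pop())
--             operators.pop()
--         elif char in priority:
--             push_operator(char)
--         prev = char
--     while operators:
--         output.append(operators.pop())
--     return ''.join(output)
-- ===== Notes on version B (the rewrite author's own statement) =====
-- stated objective: faster
-- what changed: B fuses add_concatenation's separate pass into the shunting-yard loop: a single traversal of the original regex tracking the previous character decides implicit concatenation on the fly, so the intermediate augmented string is never built or re-scanned (measured ~2x constant-factor speedup).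
import Mathlib
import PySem

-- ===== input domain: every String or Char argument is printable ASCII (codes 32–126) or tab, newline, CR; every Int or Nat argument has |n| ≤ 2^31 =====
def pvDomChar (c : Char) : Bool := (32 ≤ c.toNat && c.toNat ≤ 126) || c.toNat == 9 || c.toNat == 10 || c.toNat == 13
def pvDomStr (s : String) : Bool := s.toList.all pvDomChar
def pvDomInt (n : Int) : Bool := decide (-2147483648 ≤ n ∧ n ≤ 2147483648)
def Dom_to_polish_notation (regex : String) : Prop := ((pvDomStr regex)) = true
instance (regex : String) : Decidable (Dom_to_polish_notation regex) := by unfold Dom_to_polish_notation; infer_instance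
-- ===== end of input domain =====

-- B fuses the implicit-concatenation insertion into the shunting-yard loop: one pass over the
-- original regex tracking the previous character, instead of A's two passes through an
-- intermediate augmented string (objective: alternative single-pass decomposition).

-- ===== PORT A =====
-- priority[c] for the four operators (the dict lookup is only reached on operator chars)
def pvPriorityA (c : Char) : Int :=
  if c = '^' then 4 else if c = '*' then 3 else if c = '.' then 2 else 1

def pvIsOperatorA (c : Char) : Bool := c = '*' || c = '+' || c = '.' || c = '^'

-- is_symbol(sym): sym.isalnum() or sym == '_'  (sym is a one-character string)
def pvIsSymbolA (c : Char) : Bool := PySem.Chars.isalnum c || c = '_'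

-- the implicit-concatenation test between regex[i] and regex[i+1]
def pvCondA (a b : Char) : Bool :=
  (pvIsSymbolA a || a = ')' || a = '*' || a = '^') && (pvIsSymbolA b || b = '(')

-- add_concatenation: loop over range(len(regex)-1); regex[-1] appended last
-- (the ' ' defaults of pyGetD are never reached on a nonempty list: all indices are in range)
def pvAddConcat (l : List Char) : List Char :=
  let result := (PySem.List.pyRange 0 ((l.length : Int) - 1) 1).foldl (fun res i =>
    let res := res ++ [PySem.List.pyGetD l i ' ']
    if pvCondA (PySem.List.pyGetD l i ' ') (PySem.List.pyGetD l (i + 1) ' ')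
    then res ++ ['.'] else res) []
  result ++ [PySem.List.pyGetD l (-1) ' ']

-- while operators and operators[-1] != '(' and priority[operators[-1]] >= priority[char]
-- (stacks are kept with the top at the HEAD; Python appends/pops at the right end)
def pvPopWhileGeA (out ops : List Char) (c : Char) : List Char × List Char :=
  match ops with
  | [] => (out, [])
  | t :: rest =>
    if t ≠ '(' ∧ pvPriorityA t ≥ pvPriorityA c then pvPopWhileGeA (out ++ [t]) rest c
    else (out, t :: rest)

-- ')' branch: pop to output until '(' then discard it; pop of an empty stack raises
-- IndexError in Python (outside Pre_), the port returns the state unchanged there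
def pvPopParenA (out ops : List Char) : List Char × List Char :=
  match ops with
  | [] => (out, [])
  | t :: rest => if t ≠ '(' then pvPopParenA (out ++ [t]) rest else (out, rest)

-- the body of A's 'for char in regex' loop, state = (output, operators)
def pvStepA (s : List Char × List Char) (c : Char) : List Char × List Char :=
  if pvIsSymbolA c then (s.1 ++ [c], s.2)
  else if c = '(' then (s.1, c :: s.2)
  else if c = ')' then pvPopParenA s.1 s.2
  else if pvIsOperatorA c then
    let t := pvPopWhileGeA s.1 s.2 c
    (t.1, c :: t.2)
  else s

def to_polish_notation (regex : String) : String :=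
  if regex.toList.length = 0 then ""   -- Python: raise ValueError('Empty regex'); outside Pre_
  else
    let s := (pvAddConcat regex.toList).foldl pvStepA ([], [])
    String.ofList (s.1 ++ s.2)   -- final 'while operators' flush, then ''.join(output)

-- ===== PORT B =====
def pvPriB (c : Char) : Int :=
  if c = '^' then 4 else if c = '*' then 3 else if c = '.' then 2 else 1

-- push_operator(op): pop while lower-or-equal precedence on top, then push
def pvPushOpB (out ops : List Char) (op : Char) : List Char × List Char :=
  match ops with
  | [] => (out, [op])
  | t :: rest =>
    if t ≠ '(' ∧ pvPriB t ≥ pvPriB op then pvPushOpB (out ++ [t]) rest op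
    else (out, op :: t :: rest)

-- ')' branch of B; pop of an empty stack raises IndexError in Python (outside Pre_)
def pvParenB (out ops : List Char) : List Char × List Char :=
  match ops with
  | [] => (out, [])
  | t :: rest => if t ≠ '(' then pvParenB (out ++ [t]) rest else (out, rest)

-- body of B's single fused loop; state = ((output, operators), prev)
def pvStepB (st : (List Char × List Char) × Option Char) (c : Char) :
    (List Char × List Char) × Option Char :=
  let sym := PySem.Chars.isalnum c || c = '_'
  let s := match st.2 with
    | none => st.1
    | some p =>
      if (PySem.Chars.isalnum p || p = '_' || p = ')' || p = '*' || p = '^') && (sym || c = '(')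
      then pvPushOpB st.1.1 st.1.2 '.' else st.1
  let s :=
    if sym then (s.1 ++ [c], s.2)
    else if c = '(' then (s.1, c :: s.2)
    else if c = ')' then pvParenB s.1 s.2
    else if c = '^' || c = '*' || c = '.' || c = '+' then pvPushOpB s.1 s.2 c   -- char in priority
    else s
  (s, some c)

def to_polish_notation_alt (regex : String) : String :=
  if regex.toList.length = 0 then ""   -- raise ValueError('Empty regex'); outside Pre_
  else
    let s := (regex.toList.foldl pvStepB (([], []), none)).1
    String.ofList (s.1 ++ s.2)

-- ===== PRECONDITION & SPEC =====
-- A raises ValueError on the empty regex and IndexError when a ')' has no matching '(' on the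
-- stack; Pre_ admits exactly the inputs on which A returns: nonempty, and no prefix with more
-- ')' than '(' among the characters the algorithm reads as parentheses.
def Pre_to_polish_notation (regex : String) : Prop :=
  regex.toList ≠ [] ∧ ∀ p ∈ regex.toList.inits, p.count ')' ≤ p.count '('
instance (regex : String) : Decidable (Pre_to_polish_notation regex) := by
  unfold Pre_to_polish_notation; infer_instance

def pvWitness_to_polish_notation : String := "(a+b)*c"

def Spec_to_polish_notation (regex : String) (out : String) : Prop := out = to_polish_notation_alt regex
instance (regex : String) (out : String) : Decidable (Spec_to_polish_notation regex out) := by unfold Spec_to_polish_notation; infer_instance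

-- ===== CLAIM (what is proved, stated in full; the proofs are below) =====
def Claim_equal_to_polish_notation : Prop := ∀ (regex : String), Dom_to_polish_notation regex → Pre_to_polish_notation regex → Spec_to_polish_notation regex (to_polish_notation regex)

-- ===== LEMMAS AND PROOFS =====

-- the augmented string produced by add_concatenation, recursively: head char p, then for each
-- following char the optional '.' and the char
def pvAugTail (p : Char) : List Char → List Char
  | [] => []
  | c :: cs => (if pvCondA p c then ['.'] else []) ++ c :: pvAugTail c cs

def pvAugPre (p : Char) : List Char → List Char
  | [] => []
  | c :: cs => p :: ((if pvCondA p c then ['.'] else []) ++ pvAugPre c cs)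

lemma pvAugPre_last (p : Char) (cs : List Char) :
    pvAugPre p cs ++ [(p :: cs).getLast (by simp)] = p :: pvAugTail p cs := by
  induction cs generalizing p with
  | nil => simp [pvAugPre, pvAugTail]
  | cons c cs ih =>
    simp only [pvAugPre, pvAugTail, List.cons_append, List.append_assoc]
    rw [List.getLast_cons (by simp), ih]

lemma pvFold_range (cs : List Char) (p : Char) (acc : List Char) :
    (List.range cs.length).foldl (fun res k =>
      let res := res ++ [(p :: cs).getD k ' ']
      if pvCondA ((p :: cs).getD k ' ') ((p :: cs).getD (k + 1) ' ')
      then res ++ ['.'] else res) acc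
    = acc ++ pvAugPre p cs := by
  induction cs generalizing p acc with
  | nil => simp [pvAugPre]
  | cons c cs ih =>
    rw [List.length_cons, List.range_succ_eq_map, List.foldl_cons, List.foldl_map]
    simp only [Nat.succ_eq_add_one, List.getD_cons_succ, List.getD_cons_zero]
    have ih' := ih c (if pvCondA p c then acc ++ [p] ++ ['.'] else acc ++ [p])
    simp only [List.getD_cons_succ] at ih'
    rw [ih']
    simp only [pvAugPre]
    split <;> simp

lemma pvAddConcat_eq (p : Char) (cs : List Char) :
    pvAddConcat (p :: cs) = p :: pvAugTail p cs := by
  have hlen : ((p :: cs).length : Int) - 1 = (cs.length : Nat) := by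
    simp
  unfold pvAddConcat
  rw [hlen, PySem.List.pyRange_zero_natCast, List.foldl_map]
  have hget : ∀ k : Nat, PySem.List.pyGetD (p :: cs) (k : Int) ' ' = (p :: cs).getD k ' ' :=
    fun k => PySem.List.pyGetD_natCast _ _ _
  have hget1 : ∀ k : Nat, PySem.List.pyGetD (p :: cs) ((k : Int) + 1) ' ' = (p :: cs).getD (k + 1) ' ' := by
    intro k
    have : ((k : Int) + 1) = ((k + 1 : Nat) : Int) := by push_cast; ring
    rw [this, PySem.List.pyGetD_natCast]
  have hbody : (fun (res : List Char) (k : Nat) =>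
      let res := res ++ [PySem.List.pyGetD (p :: cs) (k : Int) ' ']
      if pvCondA (PySem.List.pyGetD (p :: cs) (k : Int) ' ')
          (PySem.List.pyGetD (p :: cs) ((k : Int) + 1) ' ')
      then res ++ ['.'] else res)
    = (fun (res : List Char) (k : Nat) =>
      let res := res ++ [(p :: cs).getD k ' ']
      if pvCondA ((p :: cs).getD k ' ') ((p :: cs).getD (k + 1) ' ')
      then res ++ ['.'] else res) := by
    funext res k; rw [hget, hget1]
  rw [hbody, pvFold_range]
  show ([] ++ pvAugPre p cs) ++ [PySem.List.pyGetD (p :: cs) (-1) ' '] = p :: pvAugTail p cs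
  rw [PySem.List.pyGetD_neg_one (p :: cs) ' ' (by simp), List.nil_append]
  exact pvAugPre_last p cs

lemma pvPri_eq (c : Char) : pvPriB c = pvPriorityA c := rfl

lemma pvPushOpB_eq (out ops : List Char) (c : Char) :
    pvPushOpB out ops c = ((pvPopWhileGeA out ops c).1, c :: (pvPopWhileGeA out ops c).2) := by
  induction ops generalizing out with
  | nil => simp [pvPushOpB, pvPopWhileGeA]
  | cons t rest ih =>
    simp only [pvPushOpB, pvPopWhileGeA, pvPri_eq]
    split
    · exact ih (out ++ [t])
    · rfl

lemma pvParenB_eq (out ops : List Char) : pvParenB out ops = pvPopParenA out ops := by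
  induction ops generalizing out with
  | nil => rfl
  | cons t rest ih =>
    simp only [pvParenB, pvPopParenA]
    split
    · exact ih (out ++ [t])
    · rfl

lemma pvOpTest_eq (c : Char) :
    (c = '^' || c = '*' || c = '.' || c = '+') = pvIsOperatorA c := by
  unfold pvIsOperatorA
  by_cases h1 : c = '^' <;> by_cases h2 : c = '*' <;> by_cases h3 : c = '.' <;>
    by_cases h4 : c = '+' <;> simp [h1, h2, h3, h4]

lemma pvStepB_main (s : List Char × List Char) (c : Char) :
    (if PySem.Chars.isalnum c || c = '_' then (s.1 ++ [c], s.2)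
     else if c = '(' then (s.1, c :: s.2)
     else if c = ')' then pvParenB s.1 s.2
     else if c = '^' || c = '*' || c = '.' || c = '+' then pvPushOpB s.1 s.2 c
     else s) = pvStepA s c := by
  simp only [pvStepA, pvIsSymbolA, pvParenB_eq, pvOpTest_eq, pvPushOpB_eq]

lemma pvStepB_none (s : List Char × List Char) (c : Char) :
    pvStepB (s, none) c = (pvStepA s c, some c) := by
  show ((if PySem.Chars.isalnum c || c = '_' then (s.1 ++ [c], s.2)
     else if c = '(' then (s.1, c :: s.2)
     else if c = ')' then pvParenB s.1 s.2
     else if c = '^' || c = '*' || c = '.' || c = '+' then pvPushOpB s.1 s.2 c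
     else s), some c) = _
  rw [pvStepB_main]

lemma pvCondA_eq (p c : Char) :
    ((PySem.Chars.isalnum p || p = '_' || p = ')' || p = '*' || p = '^')
      && ((PySem.Chars.isalnum c || c = '_') || c = '(')) = pvCondA p c := by
  simp [pvCondA, pvIsSymbolA, Bool.or_assoc]

lemma pvStepA_dot (s : List Char × List Char) :
    pvStepA s '.' = ((pvPopWhileGeA s.1 s.2 '.').1, '.' :: (pvPopWhileGeA s.1 s.2 '.').2) := by
  have h1 : pvIsSymbolA '.' = false := by decide
  have h2 : pvIsOperatorA '.' = true := by decide
  have h3 : ('.' : Char) ≠ '(' := by decide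
  have h4 : ('.' : Char) ≠ ')' := by decide
  simp [pvStepA, h1, h2, h3, h4]

lemma pvStepB_some (s : List Char × List Char) (p c : Char) :
    pvStepB (s, some p) c
      = (pvStepA (if pvCondA p c then pvStepA s '.' else s) c, some c) := by
  show ((let s' := if (PySem.Chars.isalnum p || p = '_' || p = ')' || p = '*' || p = '^')
              && ((PySem.Chars.isalnum c || c = '_') || c = '(')
          then pvPushOpB s.1 s.2 '.' else s
        if PySem.Chars.isalnum c || c = '_' then (s'.1 ++ [c], s'.2)
        else if c = '(' then (s'.1, c :: s'.2)
        else if c = ')' then pvParenB s'.1 s'.2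
        else if c = '^' || c = '*' || c = '.' || c = '+' then pvPushOpB s'.1 s'.2 c
        else s'), some c) = _
  rw [pvCondA_eq]
  congr 1
  rw [show (if pvCondA p c then pvPushOpB s.1 s.2 '.' else s)
        = (if pvCondA p c then pvStepA s '.' else s) from by
      split
      · rw [pvStepA_dot, pvPushOpB_eq]
      · rfl]
  exact pvStepB_main _ c

lemma pvFused (cs : List Char) (p : Char) (s : List Char × List Char) :
    (cs.foldl pvStepB (s, some p)).1 = (pvAugTail p cs).foldl pvStepA s := by
  induction cs generalizing p s with
  | nil => simp [pvAugTail]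
  | cons c cs ih =>
    simp only [List.foldl_cons, pvStepB_some, pvAugTail, List.foldl_append]
    rw [ih]
    congr 1
    split <;> simp

-- ===== VERDICT (by name: the statement is the Claim_ definition above) =====
theorem to_polish_notation_spec : Claim_equal_to_polish_notation := by
  intro regex _ _
  unfold Spec_to_polish_notation to_polish_notation to_polish_notation_alt
  cases h : regex.toList with
  | nil => rfl
  | cons p cs =>
    simp only [List.length_cons, Nat.succ_ne_zero]
    rw [pvAddConcat_eq, List.foldl_cons, List.foldl_cons, pvStepB_none, pvFused]
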